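-- pv_equiv track=rewrite | github.com/Shalaahuddien/FG_leetcode | 1578-minimum-time-to-make-rope-colorful/1578-minimum-time-to-make-rope-colorful.py | minCost
-- ===== SOURCE A (Python) =====
-- from typing import List
--
-- def minCost(colors: str, neededTime: List[int]) -> int:
--     ans = prev = 0  # index of previously retained letter
--     s, cost = colors, neededTime
--     for i in range(1, len(s)):
--         if s[prev] != s[i]:
--             prev = i
--         else:
--             ans += min(cost[prev], cost[i])
--             if cost[prev] < cost[i]:
--                 prev = i
--     return ans
-- ===== SOURCE B (Python) =====
-- from typing import List
--
-- def minCost(colors: str, neededTime: List[int]) -> int: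
--     # group-based: for each maximal run of equal colors, pay (sum of run) - (max of run)
--     ans = 0
--     run_char = None
--     run_sum = run_max = 0
--     for c, t in zip(colors, neededTime):
--         if c == run_char:
--             run_sum += t
--             run_max = max(run_max, t)
--         else:
--             ans += run_sum - run_max
--             run_char, run_sum, run_max = c, t, t
--     return ans + run_sum - run_max
-- ===== Notes on version B (the rewrite author's own statement) =====
-- stated objective: alternative
-- what changed: Replaces A's retained-index pointer logic (keep the cheaper removal, move prev to the pricier balloon) with a single pass over zip(colors, neededTime) that accumulates each maximal run's cost sum and maximum and adds (sum - max) at every run boundary and at the end.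
import Mathlib
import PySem

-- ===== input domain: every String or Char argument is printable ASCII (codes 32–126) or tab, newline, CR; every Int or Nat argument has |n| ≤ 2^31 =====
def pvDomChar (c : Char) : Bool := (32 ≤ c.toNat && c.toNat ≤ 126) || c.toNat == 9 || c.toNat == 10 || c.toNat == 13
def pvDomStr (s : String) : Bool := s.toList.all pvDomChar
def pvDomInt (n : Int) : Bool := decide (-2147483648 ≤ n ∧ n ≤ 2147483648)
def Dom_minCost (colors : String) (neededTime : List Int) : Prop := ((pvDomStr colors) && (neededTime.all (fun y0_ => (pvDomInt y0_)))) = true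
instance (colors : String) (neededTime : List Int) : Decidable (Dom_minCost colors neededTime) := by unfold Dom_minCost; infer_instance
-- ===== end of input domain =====

-- B replaces A's retained-index pointer logic by a one-pass per-run (sum - max) accumulation over zip(colors, neededTime); same O(n) cost, different decomposition.

-- ===== PORT A =====
-- loop body of A's for-loop, named for the proofs (state = (ans, prev))
def stepA (s : List Char) (cost : List Int) (st : Int × Int) (i : Int) : Int × Int :=
  if PySem.List.pyGetD s st.2 ' ' ≠ PySem.List.pyGetD s i ' ' then (st.1, i)
  else
    (st.1 + min (PySem.List.pyGetD cost st.2 0) (PySem.List.pyGetD cost i 0),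
     if PySem.List.pyGetD cost st.2 0 < PySem.List.pyGetD cost i 0 then i else st.2)

def minCost (colors : String) (neededTime : List Int) : Int :=
  ((PySem.List.pyRange 1 (colors.toList.length : Int) 1).foldl (stepA colors.toList neededTime) (0, 0)).1

-- ===== PORT B =====
-- loop body of B's for-loop (state = (ans, run_char, run_sum, run_max))
def stepB (st : Int × Option Char × Int × Int) (p : Char × Int) : Int × Option Char × Int × Int :=
  if some p.1 = st.2.1 then (st.1, st.2.1, st.2.2.1 + p.2, max st.2.2.2 p.2)
  else (st.1 + st.2.2.1 - st.2.2.2, some p.1, p.2, p.2)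

def minCost_alt (colors : String) (neededTime : List Int) : Int :=
  let st := (colors.toList.zip neededTime).foldl stepB (0, none, 0, 0)
  st.1 + st.2.2.1 - st.2.2.2

-- ===== PRECONDITION & SPEC =====
-- Pre_ excludes exactly the inputs where A raises IndexError: a pair of equal adjacent
-- colors whose second index is out of range of neededTime.
def Pre_minCost (colors : String) (neededTime : List Int) : Prop :=
  ∀ i, i < colors.toList.length →
    (i + 1 < colors.toList.length →
      colors.toList.getD i ' ' = colors.toList.getD (i + 1) ' ' →
      i + 1 < neededTime.length)
instance (colors : String) (neededTime : List Int) : Decidable (Pre_minCost colors neededTime) := by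
  unfold Pre_minCost; infer_instance
def pvWitness_minCost : String × List Int := ("aab", [1, 2, 3])

def Spec_minCost (colors : String) (neededTime : List Int) (out : Int) : Prop := out = minCost_alt colors neededTime
instance (colors : String) (neededTime : List Int) (out : Int) : Decidable (Spec_minCost colors neededTime out) := by unfold Spec_minCost; infer_instance

-- ===== CLAIM (what is proved, stated in full; the proofs are below) =====
def Claim_equal_minCost : Prop := ∀ (colors : String) (neededTime : List Int), Dom_minCost colors neededTime → Pre_minCost colors neededTime → Spec_minCost colors neededTime (minCost colors neededTime)

-- ===== LEMMAS AND PROOFS =====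

-- B's final flush, named for the proofs
def finishB (st : Int × Option Char × Int × Int) : Int := st.1 + st.2.2.1 - st.2.2.2

-- list-level precondition
def Pre' (s : List Char) (cost : List Int) : Prop :=
  ∀ i, i + 1 < s.length → s[i]?.getD ' ' = s[i + 1]?.getD ' ' → i + 1 < cost.length

-- Once min n m ≤ i, every remaining step of A takes the "different color" branch and ans is frozen.
lemma tailA (s : List Char) (cost : List Int) (hpre : Pre' s cost) :
    ∀ (d i : Nat) (ans : Int) (prev : Nat), 1 ≤ i → min s.length cost.length ≤ i →
      prev < i → s[prev]?.getD ' ' = s[i - 1]?.getD ' ' → s.length ≤ i + d →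
      ((PySem.List.pyRange (i : Int) (s.length : Int) 1).foldl (stepA s cost) (ans, (prev : Int))).1 = ans := by
  intro d
  induction d with
  | zero =>
    intro i ans prev h1 hK hp hc hd
    rw [PySem.List.pyRange_one_eq_nil (by exact_mod_cast hd)]
    rfl
  | succ d ih =>
    intro i ans prev h1 hK hp hc hd
    by_cases hin : i < s.length
    · rw [PySem.List.pyRange_one_cons (by exact_mod_cast hin)]
      simp only [List.foldl_cons]
      have hne : ¬ s[prev]?.getD ' ' = s[i]?.getD ' ' := by
        intro heq
        have hip : i - 1 + 1 = i := by omega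
        have := hpre (i - 1) (by omega) (by rw [hip, ← hc, heq])
        omega
      have hstep : stepA s cost (ans, (prev : Int)) (i : Int) = (ans, ((i : Nat) : Int)) := by
        simp [stepA, hne]
      rw [hstep, (by push_cast; ring : ((i : Int) + 1) = ((i + 1 : Nat) : Int))]
      exact ih (i + 1) ans i (by omega) (by omega) (by omega) (by simp) (by omega)
    · rw [PySem.List.pyRange_one_eq_nil (by exact_mod_cast (by omega : s.length ≤ i))]
      rfl

-- Main run invariant: A's remaining loop from index j equals B's remaining fold over (zip).drop j.
lemma mainA (s : List Char) (cost : List Int) (hpre : Pre' s cost) :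
    ∀ (d j : Nat) (ansB rsum rmax : Int) (prev : Nat),
      1 ≤ j → j ≤ min s.length cost.length → min s.length cost.length ≤ j + d →
      prev < j → s[prev]?.getD ' ' = s[j - 1]?.getD ' ' → cost[prev]?.getD 0 = rmax →
      ((PySem.List.pyRange (j : Int) (s.length : Int) 1).foldl (stepA s cost) (ansB + rsum - rmax, (prev : Int))).1
        = finishB (((s.zip cost).drop j).foldl stepB (ansB, some (s[j - 1]?.getD ' '), rsum, rmax)) := by
  intro d
  induction d with
  | zero =>
    intro j ansB rsum rmax prev h1 hjK hKd hp hc hm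
    rw [List.drop_eq_nil_of_le (by simp [List.length_zip]; omega)]
    simp only [List.foldl_nil, finishB]
    exact tailA s cost hpre (s.length - j) j _ prev h1 (by omega) hp hc (by omega)
  | succ d ih =>
    intro j ansB rsum rmax prev h1 hjK hKd hp hc hm
    by_cases hjlt : j < min s.length cost.length
    · have hjs : j < s.length := by omega
      have hjc : j < cost.length := by omega
      have hzlen : j < (s.zip cost).length := by simp [List.length_zip]; omega
      rw [List.drop_eq_getElem_cons hzlen]
      have hz : (s.zip cost)[j] = (s[j], cost[j]) := List.getElem_zip
      rw [PySem.List.pyRange_one_cons (by exact_mod_cast hjs)]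
      simp only [List.foldl_cons]
      have hgj : s[j]?.getD ' ' = s[j] := by simp [List.getElem?_eq_getElem hjs]
      have hcj : cost[j]?.getD 0 = cost[j] := by simp [List.getElem?_eq_getElem hjc]
      have hj1 : j + 1 - 1 = j := by omega
      by_cases heq : s[prev]?.getD ' ' = s[j]?.getD ' '
      · -- same color: A adds the min and keeps the larger; B extends the run
        have hstep : stepA s cost (ansB + rsum - rmax, (prev : Int)) (j : Int) =
            (ansB + rsum - rmax + min rmax cost[j],
             if rmax < cost[j] then ((j : Nat) : Int) else (prev : Int)) := by
          simp only [stepA, PySem.List.pyGetD_natCast, List.getD_eq_getElem?_getD, heq, hm, hcj,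
            ne_eq, not_true_eq_false, if_false]
        rw [hstep]
        have hstepB : stepB (ansB, some (s[j - 1]?.getD ' '), rsum, rmax) (s[j], cost[j]) =
            (ansB, some (s[j - 1]?.getD ' '), rsum + cost[j], max rmax cost[j]) := by
          have hcc : some ((s[j], cost[j]).1) = some (s[j - 1]?.getD ' ') := by
            rw [← hc, ← hgj, heq]
          simp [stepB, hcc]
        rw [hz, hstepB]
        have harith : ansB + rsum - rmax + min rmax cost[j]
            = ansB + (rsum + cost[j]) - max rmax cost[j] := by
          rcases le_total rmax cost[j] with hle | hle
          · rw [min_eq_left hle, max_eq_right hle]; ring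
          · rw [min_eq_right hle, max_eq_left hle]; ring
        have hcharj : s[j + 1 - 1]?.getD ' ' = s[j - 1]?.getD ' ' := by
          rw [hj1, ← heq]; exact hc
        by_cases hlt : rmax < cost[j]
        · rw [if_pos hlt, harith,
            (by push_cast; ring : ((j : Int) + 1) = ((j + 1 : Nat) : Int))]
          have := ih (j + 1) ansB (rsum + cost[j]) (max rmax cost[j]) j (by omega) (by omega)
            (by omega) (by omega) (by rw [hj1]) (by rw [hcj, max_eq_right (le_of_lt hlt)])
          rw [this, hcharj]
        · rw [if_neg hlt, harith,
            (by push_cast; ring : ((j : Int) + 1) = ((j + 1 : Nat) : Int))]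
          have := ih (j + 1) ansB (rsum + cost[j]) (max rmax cost[j]) prev (by omega) (by omega)
            (by omega) (by omega) (by rw [hj1]; exact heq)
            (by rw [hm, max_eq_left (by omega)])
          rw [this, hcharj]
      · -- new color: A moves the pointer; B flushes the run
        have hstep : stepA s cost (ansB + rsum - rmax, (prev : Int)) (j : Int) =
            (ansB + rsum - rmax, ((j : Nat) : Int)) := by
          simp only [stepA, PySem.List.pyGetD_natCast, List.getD_eq_getElem?_getD, ne_eq, heq,
            not_false_eq_true, if_true]
        rw [hstep]
        have hstepB : stepB (ansB, some (s[j - 1]?.getD ' '), rsum, rmax) (s[j], cost[j]) =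
            (ansB + rsum - rmax, some s[j], cost[j], cost[j]) := by
          have hcc : ¬ some ((s[j], cost[j]).1) = some (s[j - 1]?.getD ' ') := by
            simp only [Option.some.injEq]
            intro h
            exact heq (by rw [hc, ← h]; exact hgj.symm)
          simp [stepB, hcc]
        rw [hz, hstepB,
          (by push_cast; ring : ((j : Int) + 1) = ((j + 1 : Nat) : Int))]
        have := ih (j + 1) (ansB + rsum - rmax) cost[j] cost[j] j (by omega) (by omega)
          (by omega) (by omega) (by rw [hj1]) hcj
        have e : (ansB + rsum - rmax : Int) = ansB + rsum - rmax + cost[j] - cost[j] := by ring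
        conv_lhs => rw [e]
        rw [this, hj1, hgj]
    · rw [List.drop_eq_nil_of_le (by simp [List.length_zip]; omega)]
      simp only [List.foldl_nil, finishB]
      exact tailA s cost hpre (s.length - j) j _ prev h1 (by omega) hp hc (by omega)

-- the whole programs agree, at the level of char/cost lists
lemma coreAB (s : List Char) (cost : List Int) (hpre : Pre' s cost) :
    ((PySem.List.pyRange 1 (s.length : Int) 1).foldl (stepA s cost) (0, 0)).1
      = finishB ((s.zip cost).foldl stepB (0, none, 0, 0)) := by
  by_cases hn : 1 ≤ s.length ∧ 1 ≤ cost.length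
  · obtain ⟨hn1, hm1⟩ := hn
    have hzlen : 0 < (s.zip cost).length := by simp [List.length_zip]; omega
    rw [show s.zip cost = (s.zip cost).drop 0 from List.drop_zero.symm,
      List.drop_eq_getElem_cons hzlen]
    simp only [List.foldl_cons, Nat.zero_add]
    have hz0 : (s.zip cost)[0] = (s[0]'(by omega), cost[0]'(by omega)) := List.getElem_zip
    have hstepB0 : stepB (0, none, 0, 0) ((s.zip cost)[0]) =
        ((0 : Int), some (s[0]'(by omega)), cost[0]'(by omega), cost[0]'(by omega)) := by
      rw [hz0]; simp [stepB]
    rw [hstepB0]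
    have h0s : s[1 - 1]?.getD ' ' = s[0]'(by omega) := by
      simp [List.getElem?_eq_getElem (show 0 < s.length by omega)]
    have h0c : cost[0]?.getD 0 = cost[0]'(by omega) := by
      simp [List.getElem?_eq_getElem (show 0 < cost.length by omega)]
    have hmain := mainA s cost hpre (min s.length cost.length - 1) 1 0
      (cost[0]?.getD 0) (cost[0]?.getD 0) 0 (le_refl 1) (by omega) (by omega) (by omega)
      (by rw [(by omega : (1 : Nat) - 1 = 0)]) rfl
    rw [(by ring : ((0 : Int) + cost[0]?.getD 0 - cost[0]?.getD 0) = 0)] at hmain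
    rw [(by norm_num : ((1 : Nat) : Int) = 1), (by norm_num : (((0 : Nat)) : Int) = (0 : Int))] at hmain
    rw [hmain, h0s, h0c]
  · by_cases hs1 : s.length ≤ 1
    · rw [PySem.List.pyRange_one_eq_nil (by exact_mod_cast hs1 : (s.length : Int) ≤ 1)]
      have hlen : (s.zip cost).length ≤ 1 := by simp [List.length_zip]; omega
      match hx : s.zip cost, hlen with
      | [], _ => rfl
      | [p], _ => simp [stepB, finishB]
    · have hm0 : cost.length = 0 := by
        by_cases hcl : 1 ≤ cost.length
        · exact absurd ⟨by omega, hcl⟩ hn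
        · omega
      have hnil : s.zip cost = [] := by
        have : (s.zip cost).length = 0 := by rw [List.length_zip]; omega
        exact List.eq_nil_of_length_eq_zero this
      rw [hnil]
      have := tailA s cost hpre (s.length - 1) 1 0 0 (le_refl 1) (by omega) (by omega)
        (by rw [(by omega : (1 : Nat) - 1 = 0)]) (by omega)
      rw [(by norm_num : ((1 : Nat) : Int) = 1), (by norm_num : (((0 : Nat)) : Int) = (0 : Int))] at this
      rw [this]
      simp [finishB]

-- ===== VERDICT (by name: the statement is the Claim_ definition above) =====
theorem minCost_spec : Claim_equal_minCost := by
  intro colors neededTime _hdom hpre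
  unfold Spec_minCost minCost minCost_alt
  have hpre' : Pre' colors.toList neededTime := by
    intro i h1 h2
    exact hpre i (by omega) h1 (by simpa [List.getD_eq_getElem?_getD] using h2)
  simpa [finishB] using coreAB colors.toList neededTime hpre'
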